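-- pv_equiv track=rewrite | github.com/Noboomta/Computer-Programming1-SKE-KU-2019 | Lab and Project/my_project/my_own_battleship.py | get_submarine_info
-- ===== SOURCE A (Python) =====
-- def get_submarine_info(field,sub_names):
--
--     orig_sizes = {x:0 for x in sub_names}
--     curr_sizes = {x:0 for x in sub_names}
--     statuses = {x:'T' for x in sub_names}
--
--     for i in range(len(field)):
--         for j in range(len(field[i])):
--             if field[i][j] == 3:
--                 orig_sizes['Seawolf'] += 1
--             elif field[i][j] == 2:
--                 orig_sizes['Nautilus'] += 1
--             elif field[i][j] == 1:
--                 orig_sizes['Marlin'] += 1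
--
--     for i in range(len(field)):
--         for j in range(len(field[i])):
--             if field[i][j] == 3:
--                 curr_sizes['Seawolf'] += 1
--             elif field[i][j] == 1:
--                 curr_sizes['Marlin'] += 1
--             elif field[i][j] == 2:
--                 curr_sizes['Nautilus'] += 1
--
--     return orig_sizes,curr_sizes,statuses
-- ===== SOURCE B (Python) =====
-- def get_submarine_info(field, sub_names):
--     counts = {1: 0, 2: 0, 3: 0}
--     for row in field:
--         for v in row:
--             if v in counts:
--                 counts[v] += 1
--     value_of = {'Seawolf': 3, 'Nautilus': 2, 'Marlin': 1}
--     orig_sizes = {x: counts.get(value_of.get(x), 0) for x in sub_names}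
--     curr_sizes = dict(orig_sizes)
--     statuses = {x: 'T' for x in sub_names}
--     return orig_sizes, curr_sizes, statuses
-- ===== Notes on version B (the rewrite author's own statement) =====
-- stated objective: idiomatic
-- what changed: B replaces A's two independent nested counting passes that increment per-ship dict entries by one tabulation of the cell values into a counts dict plus a name-to-value lookup table used to build both result dicts at once.
import Mathlib
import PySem

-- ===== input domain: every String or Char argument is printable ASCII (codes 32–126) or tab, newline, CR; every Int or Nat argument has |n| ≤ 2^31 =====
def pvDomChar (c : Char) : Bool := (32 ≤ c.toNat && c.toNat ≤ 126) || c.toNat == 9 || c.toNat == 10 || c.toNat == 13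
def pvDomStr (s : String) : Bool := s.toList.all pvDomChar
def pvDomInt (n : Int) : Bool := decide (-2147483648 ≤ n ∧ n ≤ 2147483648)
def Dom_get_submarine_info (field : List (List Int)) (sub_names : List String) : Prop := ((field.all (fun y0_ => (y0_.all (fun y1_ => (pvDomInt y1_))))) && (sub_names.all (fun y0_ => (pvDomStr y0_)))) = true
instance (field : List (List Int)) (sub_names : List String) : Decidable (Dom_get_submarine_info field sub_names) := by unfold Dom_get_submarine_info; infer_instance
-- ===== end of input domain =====

-- B replaces A's two nested counting passes (one per result dict) by a single tabulation of the
-- cell values plus a name→value lookup table; objective: idiomatic/simpler (no speed claim).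

-- ===== PORT A =====
-- body of A's first counting loop ('orig_sizes[name] += 1'; += on a missing key is a KeyError in
-- Python — those inputs are excluded by Pre_; on a present key Dict.modify is exact)
def pvStepA1 (d : PySem.Dict String Int) (v : Int) : PySem.Dict String Int :=
  if v == 3 then d.modify "Seawolf" 0 (· + 1)
  else if v == 2 then d.modify "Nautilus" 0 (· + 1)
  else if v == 1 then d.modify "Marlin" 0 (· + 1)
  else d

-- body of A's second counting loop (same branches, 2 and 1 tested in the other order)
def pvStepA2 (d : PySem.Dict String Int) (v : Int) : PySem.Dict String Int :=
  if v == 3 then d.modify "Seawolf" 0 (· + 1)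
  else if v == 1 then d.modify "Marlin" 0 (· + 1)
  else if v == 2 then d.modify "Nautilus" 0 (· + 1)
  else d

-- A iterates 'for i in range(len(field)): for j in range(len(field[i]))': every index is in range,
-- so the loops are ported as nested folds over the rows and their cells
def get_submarine_info (field : List (List Int)) (sub_names : List String) : (List (String × Int)) × (List (String × Int)) × (List (String × String)) :=
  let orig_sizes0 : PySem.Dict String Int := sub_names.foldl (fun d x => d.insert x 0) PySem.Dict.empty
  let curr_sizes0 : PySem.Dict String Int := sub_names.foldl (fun d x => d.insert x 0) PySem.Dict.empty
  let statuses : PySem.Dict String String := sub_names.foldl (fun d x => d.insert x "T") PySem.Dict.empty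
  let orig_sizes := field.foldl (fun d row => row.foldl pvStepA1 d) orig_sizes0
  let curr_sizes := field.foldl (fun d row => row.foldl pvStepA2 d) curr_sizes0
  (orig_sizes.items, curr_sizes.items, statuses.items)

-- ===== PORT B =====
-- B's initial tally dict counts = {1: 0, 2: 0, 3: 0}
def pvCounts0 : PySem.Dict Int Int := (((PySem.Dict.empty : PySem.Dict Int Int).insert 1 0).insert 2 0).insert 3 0

-- body of B's single tabulation loop ('if v in counts: counts[v] += 1')
def pvStepB (d : PySem.Dict Int Int) (v : Int) : PySem.Dict Int Int :=
  if d.contains v then d.modify v 0 (· + 1) else d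

-- B's literal lookup table value_of = {'Seawolf': 3, 'Nautilus': 2, 'Marlin': 1}
def pvValueOf : PySem.Dict String Int :=
  (((PySem.Dict.empty : PySem.Dict String Int).insert "Seawolf" 3).insert "Nautilus" 2).insert "Marlin" 1

-- counts.get(value_of.get(x), 0): when value_of.get(x) is None, counts.get(None, 0) is 0
def pvLookupB (counts : PySem.Dict Int Int) (x : String) : Int :=
  match pvValueOf.get? x with
  | some v => counts.getD v 0
  | none => 0

def get_submarine_info_alt (field : List (List Int)) (sub_names : List String) : (List (String × Int)) × (List (String × Int)) × (List (String × String)) :=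
  let counts := field.foldl (fun d row => row.foldl pvStepB d) pvCounts0
  let orig_sizes : PySem.Dict String Int := sub_names.foldl (fun d x => d.insert x (pvLookupB counts x)) PySem.Dict.empty
  let curr_sizes := orig_sizes  -- dict(orig_sizes) is a copy with the same items
  let statuses : PySem.Dict String String := sub_names.foldl (fun d x => d.insert x "T") PySem.Dict.empty
  (orig_sizes.items, curr_sizes.items, statuses.items)

-- ===== PRECONDITION & SPEC =====
-- Pre_ excludes exactly the inputs on which A raises KeyError: a cell value 3/2/1 occurs in field
-- while the corresponding ship name is missing from sub_names.
def Pre_get_submarine_info (field : List (List Int)) (sub_names : List String) : Prop :=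
  ((3 : Int) ∈ field.flatten → "Seawolf" ∈ sub_names) ∧
  ((2 : Int) ∈ field.flatten → "Nautilus" ∈ sub_names) ∧
  ((1 : Int) ∈ field.flatten → "Marlin" ∈ sub_names)
instance (field : List (List Int)) (sub_names : List String) : Decidable (Pre_get_submarine_info field sub_names) := by unfold Pre_get_submarine_info; infer_instance

def pvWitness_get_submarine_info : List (List Int) × List String :=
  ([[3, 1, 0], [2, 3]], ["Seawolf", "Nautilus", "Marlin"])

def Spec_get_submarine_info (field : List (List Int)) (sub_names : List String) (out : (List (String × Int)) × (List (String × Int)) × (List (String × String))) : Prop := out = get_submarine_info_alt field sub_names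
instance (field : List (List Int)) (sub_names : List String) (out : (List (String × Int)) × (List (String × Int)) × (List (String × String))) : Decidable (Spec_get_submarine_info field sub_names out) := by unfold Spec_get_submarine_info; infer_instance

-- ===== CLAIM (what is proved, stated in full; the proofs are below) =====
def Claim_equal_get_submarine_info : Prop := ∀ (field : List (List Int)) (sub_names : List String), Dom_get_submarine_info field sub_names → Pre_get_submarine_info field sub_names → Spec_get_submarine_info field sub_names (get_submarine_info field sub_names)

-- ===== LEMMAS AND PROOFS =====

-- what each ship name should count, over the flattened list of cells
def pvTally (cells : List Int) (k : String) : Int :=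
  if k = "Seawolf" then (cells.count 3 : Int)
  else if k = "Nautilus" then (cells.count 2 : Int)
  else if k = "Marlin" then (cells.count 1 : Int)
  else 0

theorem pvTally_nil (k : String) : pvTally [] k = 0 := by
  unfold pvTally; split_ifs <;> simp

theorem pvStepA1_getD (d : PySem.Dict String Int) (v : Int) (k : String) :
    (pvStepA1 d v).getD k 0 = d.getD k 0 + pvTally [v] k := by
  unfold pvStepA1 pvTally
  split_ifs with h3 h2 h1 <;>
    simp_all [PySem.Dict.getD_modify] <;>
    split_ifs <;> simp_all

theorem pvTally_cons (v : Int) (t : List Int) (k : String) :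
    pvTally (v :: t) k = pvTally [v] k + pvTally t k := by
  unfold pvTally
  split_ifs <;> simp [List.count_cons] <;> split_ifs <;> omega

theorem pvFoldA1_getD (cells : List Int) (d : PySem.Dict String Int) (k : String) :
    (cells.foldl pvStepA1 d).getD k 0 = d.getD k 0 + pvTally cells k := by
  induction cells generalizing d with
  | nil => simp [pvTally_nil]
  | cons v t ih =>
      rw [List.foldl_cons, ih, pvStepA1_getD, pvTally_cons v t k]
      ring

theorem pvStepA2_eq (d : PySem.Dict String Int) (v : Int) : pvStepA2 d v = pvStepA1 d v := by
  unfold pvStepA1 pvStepA2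
  by_cases h3 : v = 3 <;> by_cases h2 : v = 2 <;> by_cases h1 : v = 1 <;> simp_all

theorem pvFoldA1_keys (cells : List Int) (d : PySem.Dict String Int)
    (h3 : (3 : Int) ∈ cells → d.contains "Seawolf")
    (h2 : (2 : Int) ∈ cells → d.contains "Nautilus")
    (h1 : (1 : Int) ∈ cells → d.contains "Marlin") :
    (cells.foldl pvStepA1 d).keys = d.keys := by
  induction cells generalizing d with
  | nil => rfl
  | cons v t ih =>
      have hcont : ∀ k, d.contains k = true → (pvStepA1 d v).contains k = true := by
        intro k hk
        unfold pvStepA1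
        split_ifs <;> simp [PySem.Dict.contains_modify, hk]
      have hkeys : (pvStepA1 d v).keys = d.keys := by
        unfold pvStepA1
        split_ifs with hv3 hv2 hv1
        · rw [PySem.Dict.keys_modify, PySem.Dict.keys_insert_of_contains]
          exact h3 (by simp_all)
        · rw [PySem.Dict.keys_modify, PySem.Dict.keys_insert_of_contains]
          exact h2 (by simp_all)
        · rw [PySem.Dict.keys_modify, PySem.Dict.keys_insert_of_contains]
          exact h1 (by simp_all)
        · rfl
      rw [List.foldl_cons,
        ih (pvStepA1 d v) (fun hm => hcont _ (h3 (by simp [hm])))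
          (fun hm => hcont _ (h2 (by simp [hm]))) (fun hm => hcont _ (h1 (by simp [hm]))),
        hkeys]

theorem pvStepB_contains (d : PySem.Dict Int Int) (v w : Int) :
    (pvStepB d v).contains w = d.contains w := by
  unfold pvStepB
  split_ifs with hv
  · simp [PySem.Dict.contains_modify]
    intro h; subst h; exact hv
  · rfl

theorem pvFoldB_getD (cells : List Int) (d : PySem.Dict Int Int) (w : Int)
    (hw : d.contains w = true) :
    (cells.foldl pvStepB d).getD w 0 = d.getD w 0 + (cells.count w : Int) := by
  induction cells generalizing d with
  | nil => simp
  | cons v t ih =>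
      have hw' : (pvStepB d v).contains w = true := by rw [pvStepB_contains]; exact hw
      rw [List.foldl_cons, ih _ hw']
      unfold pvStepB
      split_ifs with hv
      · rw [PySem.Dict.getD_modify]
        by_cases hvw : w = v
        · subst hvw; simp [List.count_cons]; ring
        · simp [hvw, Ne.symm hvw]
      · have hvw : v ≠ w := by rintro rfl; rw [hw] at hv; exact hv rfl
        simp [hvw]

theorem pvInsLoop_getD (names : List String) (g : String → Int) (d : PySem.Dict String Int) (k : String) :
    (names.foldl (fun d x => d.insert x (g x)) d).getD k 0 =
      if k ∈ names then g k else d.getD k 0 := by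
  induction names generalizing d with
  | nil => simp
  | cons x t ih =>
      rw [List.foldl_cons, ih]
      by_cases ht : k ∈ t <;> by_cases hx : k = x <;>
        simp [ht, hx, PySem.Dict.getD_insert]

theorem pvInsLoop_keys (names : List String) (g : String → Int) :
    (names.foldl (fun d x => d.insert x (g x)) (PySem.Dict.empty : PySem.Dict String Int)).keys
      = PySem.Set.ofList names := by
  rw [PySem.Dict.keys_foldl_insert (f := fun d x => g x)]
  simp [PySem.Set.ofList_eq_foldl, PySem.Set.update, PySem.Dict.keys_empty]

theorem pvLookupB_eq_tally (field : List (List Int)) (k : String) :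
    pvLookupB (field.foldl (fun d row => row.foldl pvStepB d) pvCounts0) k
      = pvTally field.flatten k := by
  rw [show (field.foldl (fun d row => row.foldl pvStepB d) pvCounts0) = field.flatten.foldl pvStepB pvCounts0 from (List.foldl_flatten).symm]
  have c3 := pvFoldB_getD field.flatten pvCounts0 3 (by decide)
  have c2 := pvFoldB_getD field.flatten pvCounts0 2 (by decide)
  have c1 := pvFoldB_getD field.flatten pvCounts0 1 (by decide)
  have e3 : pvCounts0.getD 3 0 = 0 := by decide
  have e2 : pvCounts0.getD 2 0 = 0 := by decide
  have e1 : pvCounts0.getD 1 0 = 0 := by decide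
  unfold pvLookupB pvTally pvValueOf
  by_cases hS : k = "Seawolf" <;> by_cases hN : k = "Nautilus" <;> by_cases hM : k = "Marlin" <;>
    simp_all [PySem.Dict.get?_insert]

-- ===== VERDICT (by name: the statement is the Claim_ definition above) =====
theorem get_submarine_info_spec : Claim_equal_get_submarine_info := by
  intro field sub_names _ hpre
  obtain ⟨h3, h2, h1⟩ := hpre
  unfold Spec_get_submarine_info get_submarine_info get_submarine_info_alt
  have hmemcontains : ∀ x ∈ sub_names,
      (sub_names.foldl (fun d x => d.insert x (0 : Int)) PySem.Dict.empty).contains x = true := by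
    intro x hx
    rw [PySem.Dict.contains_iff_mem_keys, pvInsLoop_keys sub_names (fun _ => 0), PySem.Set.mem_ofList]
    exact hx
  -- the A-side orig/curr dict, rewritten over the flattened cell list
  have hAflat : ∀ st : PySem.Dict String Int,
      field.foldl (fun d row => row.foldl pvStepA1 d) st = field.flatten.foldl pvStepA1 st :=
    fun st => (List.foldl_flatten).symm
  have hA2 : field.foldl (fun d row => row.foldl pvStepA2 d) (sub_names.foldl (fun d x => d.insert x (0:Int)) PySem.Dict.empty)
      = field.foldl (fun d row => row.foldl pvStepA1 d) (sub_names.foldl (fun d x => d.insert x (0:Int)) PySem.Dict.empty) := by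
    have : pvStepA2 = pvStepA1 := by funext d v; exact pvStepA2_eq d v
    rw [this]
  have hkeysA : (field.flatten.foldl pvStepA1 (sub_names.foldl (fun d x => d.insert x (0:Int)) PySem.Dict.empty)).keys
      = PySem.Set.ofList sub_names := by
    rw [pvFoldA1_keys _ _ (fun hm => hmemcontains _ (h3 hm)) (fun hm => hmemcontains _ (h2 hm))
        (fun hm => hmemcontains _ (h1 hm))]
    exact pvInsLoop_keys sub_names (fun _ => 0)
  have hnodA : (field.flatten.foldl pvStepA1 (sub_names.foldl (fun d x => d.insert x (0:Int)) PySem.Dict.empty)).keys.Nodup := by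
    rw [hkeysA]; exact PySem.Set.nodup_ofList sub_names
  have hkeysB : (sub_names.foldl (fun d x => d.insert x (pvLookupB (field.foldl (fun d row => row.foldl pvStepB d) pvCounts0) x)) PySem.Dict.empty).keys = PySem.Set.ofList sub_names :=
    pvInsLoop_keys sub_names _
  have hnodB : (sub_names.foldl (fun d x => d.insert x (pvLookupB (field.foldl (fun d row => row.foldl pvStepB d) pvCounts0) x)) PySem.Dict.empty).keys.Nodup := by
    rw [hkeysB]; exact PySem.Set.nodup_ofList sub_names
  have hitems : (field.foldl (fun d row => row.foldl pvStepA1 d) (sub_names.foldl (fun d x => d.insert x (0:Int)) PySem.Dict.empty)).items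
      = (sub_names.foldl (fun d x => d.insert x (pvLookupB (field.foldl (fun d row => row.foldl pvStepB d) pvCounts0) x)) PySem.Dict.empty).items := by
    rw [hAflat, PySem.Dict.items_eq_map_keys _ hnodA 0, PySem.Dict.items_eq_map_keys _ hnodB 0,
      hkeysA, hkeysB]
    apply List.map_congr_left
    intro k hk
    have hkmem : k ∈ sub_names := (PySem.Set.mem_ofList sub_names k).mp hk
    rw [pvFoldA1_getD, pvInsLoop_getD sub_names (fun _ => (0:Int)),
      pvInsLoop_getD sub_names _ PySem.Dict.empty k]
    simp [hkmem, pvLookupB_eq_tally field k]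
  simp only [hA2, hitems]
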